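-- pv_equiv track=rewrite | github.com/Cycyber/CCPS109---Computer-Science-1 | labs109.py | eliminate_neighbours
-- ===== SOURCE A (Python) =====
-- def eliminate_neighbours(items):
--     if len(items) == 1:  # Edge Case
--         return 1
--     original_length = len(items)
--     step_count = 0
--     for i in range(1, len(items) + 1):
--         if i in items:
--             step_count += 1
--             if len(items) == 1:
--                 items.pop(0)
--                 break
--             center = items.index(i)
--             left = center - 1
--             if left < 0 or ((center + 1) < len(items) and items[center + 1] > items[left]):
--                 left = center + 1
--             value = items[left]
--             if center > left:
--                 center = left
--             items.pop(center)
--             items.pop(center)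
--             if value == original_length:
--                 break
--     return step_count
-- ===== SOURCE B (Python) =====
-- def eliminate_neighbours(items):
--     # Doubly-linked list over positions + value->positions index: O(n) vs A's
--     # repeated O(n) membership/index/pop scans. Return value only: unlike A,
--     # this does not mutate the caller's list.
--     n = len(items)
--     if n == 1:
--         return 1
--     pos = {}
--     for j, v in enumerate(items):
--         pos.setdefault(v, []).append(j)
--     prv = list(range(-1, n - 1))
--     nxt = list(range(1, n + 1))
--     alive = [True] * n
--     steps = 0
--     for i in range(1, n + 1):
--         c = next((p for p in pos.get(i, ()) if alive[p]), None)
--         if c is None: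
--             continue
--         steps += 1
--         a, b = prv[c], nxt[c]
--         if a == -1 and b == n:
--             break
--         if a == -1 or (b != n and items[b] > items[a]):
--             other = b
--         else:
--             other = a
--         for x in (c, other):
--             pa, pb = prv[x], nxt[x]
--             if pa != -1:
--                 nxt[pa] = pb
--             if pb != n:
--                 prv[pb] = pa
--             alive[x] = False
--         if items[other] == n:
--             break
--     return steps
-- ===== Notes on version B (the rewrite author's own statement) =====
-- stated objective: faster
-- what changed: Replaces A's per-step O(n) membership test, list.index scan and two list pops by a doubly-linked list over positions (prv/nxt arrays) plus a value->positions index built once, giving O(1) neighbor lookup and removal per step; B does not mutate the input list (A does).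
import Mathlib
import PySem

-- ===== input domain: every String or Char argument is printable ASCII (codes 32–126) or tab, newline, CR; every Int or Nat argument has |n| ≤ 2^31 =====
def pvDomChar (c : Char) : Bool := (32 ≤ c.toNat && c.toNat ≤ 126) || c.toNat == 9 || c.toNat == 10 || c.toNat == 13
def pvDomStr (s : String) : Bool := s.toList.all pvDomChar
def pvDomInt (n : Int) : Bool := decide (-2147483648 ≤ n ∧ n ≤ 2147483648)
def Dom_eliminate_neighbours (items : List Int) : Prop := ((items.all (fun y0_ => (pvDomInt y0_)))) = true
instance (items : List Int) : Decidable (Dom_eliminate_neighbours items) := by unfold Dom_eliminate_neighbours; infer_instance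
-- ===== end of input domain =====

-- B replaces A's per-step O(n) membership/index/pop scans by a doubly-linked list over
-- positions plus a value→positions map built once (objective: faster, asymptotic).
-- A mutates its argument in place (pops elements); B does not: the equivalence proved
-- here is about the RETURN value only.

-- ===== PORT A =====
-- one iteration of A's `for i in range(1, len(items)+1)` body; state = (items, step_count, broke)
def pvBodyA (n : Int) (st : List Int × Int × Bool) (i : Int) : List Int × Int × Bool :=
  match st with
  | (xs, steps, done) =>
    if done then (xs, steps, done)      -- `break` happened: remaining iterations do nothing
    else if xs.contains i then          -- `if i in items`
      let steps := steps + 1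
      if xs.length == 1 then
        (((PySem.List.pop? xs 0).getD (0, xs)).2, steps, true)   -- items.pop(0); break
      else
        let center : Int := ↑((PySem.List.index? xs i).getD 0)   -- items.index(i): always found here
        let left : Int := center - 1
        let left : Int :=
          if left < 0 ∨ (center + 1 < ↑xs.length ∧
              PySem.List.pyGetD xs (center + 1) 0 > PySem.List.pyGetD xs left 0)
          then center + 1 else left
        let value := PySem.List.pyGetD xs left 0
        let center := if center > left then left else center
        let xs := ((PySem.List.pop? xs center).getD (0, xs)).2   -- items.pop(center): in range here
        let xs := ((PySem.List.pop? xs center).getD (0, xs)).2   -- items.pop(center)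
        (xs, steps, decide (value = n))                          -- if value == original_length: break
    else (xs, steps, done)

def eliminate_neighbours (items : List Int) : Int :=
  if items.length == 1 then 1
  else
    let n : Int := ↑items.length
    ((PySem.List.pyRange 1 (n + 1) 1).foldl (pvBodyA n) (items, 0, false)).2.1

-- ===== PORT B =====
-- unlink node x from the doubly-linked list (prv, nxt) and mark it dead
def pvUnlink (n : Int) (t : List Int × List Int × List Bool) (x : Nat) : List Int × List Int × List Bool :=
  match t with
  | (prv, nxt, alive) =>
    let pa := prv.getD x 0
    let pb := nxt.getD x 0
    let nxt := if pa ≠ -1 then nxt.set pa.toNat pb else nxt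
    let prv := if pb ≠ n then prv.set pb.toNat pa else prv
    (prv, nxt, alive.set x false)

-- one iteration of B's loop; state = ((prv, nxt, alive), steps, broke)
def pvBodyB (orig : List Int) (n : Int) (pos : PySem.Dict Int (List Nat))
    (st : (List Int × List Int × List Bool) × Int × Bool) (i : Int) :
    (List Int × List Int × List Bool) × Int × Bool :=
  match st with
  | (pna, steps, done) =>
    if done then (pna, steps, done)
    else
      match (pos.getD i []).find? (fun p => pna.2.2.getD p false) with
      | none => (pna, steps, done)     -- c is None: continue
      | some c =>
        let steps := steps + 1
        let a := pna.1.getD c 0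
        let b := pna.2.1.getD c 0
        if a = -1 ∧ b = n then (pna, steps, true)     -- last remaining element: break
        else
          -- positions are nonnegative, so .toNat below is exact where the value is used
          let other : Nat :=
            if a = -1 ∨ (b ≠ n ∧ orig.getD b.toNat 0 > orig.getD a.toNat 0)
            then b.toNat else a.toNat
          let pna := [c, other].foldl (pvUnlink n) pna      -- for x in (c, other): unlink x
          (pna, steps, decide (orig.getD other 0 = n))      -- if items[other] == n: break

def eliminate_neighbours_alt (items : List Int) : Int :=
  let n := items.length
  if n == 1 then 1
  else
    -- pos.setdefault(v, []).append(j)  ==  pos[v] = pos.get(v, []) + [j] (key keeps its slot)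
    let pos : PySem.Dict Int (List Nat) :=
      (PySem.List.enumerate items 0).foldl
        (fun d jv => d.insert jv.2 (d.getD jv.2 [] ++ [jv.1.toNat])) PySem.Dict.empty
    let prv := PySem.List.pyRange (-1) (↑n - 1) 1
    let nxt := PySem.List.pyRange 1 (↑n + 1) 1
    let alive := List.replicate n true
    ((PySem.List.pyRange 1 (↑n + 1) 1).foldl (pvBodyB items ↑n pos) ((prv, nxt, alive), 0, false)).2.1

-- ===== PRECONDITION & SPEC =====
def Spec_eliminate_neighbours (items : List Int) (out : Int) : Prop := out = eliminate_neighbours_alt items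
instance (items : List Int) (out : Int) : Decidable (Spec_eliminate_neighbours items out) := by unfold Spec_eliminate_neighbours; infer_instance

-- ===== CLAIM (what is proved, stated in full; the proofs are below) =====
def Claim_equal_eliminate_neighbours : Prop := ∀ (items : List Int), Dom_eliminate_neighbours items → Spec_eliminate_neighbours items (eliminate_neighbours items)

-- ===== LEMMAS AND PROOFS =====

-- j is alive
def pvAliveP (alive : List Bool) (j : Nat) : Bool := alive.getD j false

-- the sorted list of alive positions
def pvIdxs (n : Nat) (alive : List Bool) : List Nat := (List.range n).filter (pvAliveP alive)

-- the pointer pair (x, y) is correctly linked (sentinels: -1 on the left, n on the right)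
def pvLk (n : Int) (prv nxt : List Int) (x y : Int) : Prop :=
  (x ≠ -1 → nxt.getD x.toNat 0 = y) ∧ (y ≠ n → prv.getD y.toNat 0 = x)

-- the chain from left sentinel p through the positions I to the right sentinel q
def pvSeg (n : Int) (prv nxt : List Int) : Int → List Nat → Int → Prop
  | p, [], q => pvLk n prv nxt p q
  | p, j :: rest, q => pvLk n prv nxt p ↑j ∧ pvSeg n prv nxt ↑j rest q

-- loop invariant: equal steps and break flags; while not broken, A's current list is the
-- values at B's alive positions in order, and B's pointers link the alive positions
def pvInv (orig : List Int) (sA : List Int × Int × Bool)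
    (sB : (List Int × List Int × List Bool) × Int × Bool) : Prop :=
  sA.2.1 = sB.2.1 ∧ sA.2.2 = sB.2.2 ∧
  (sA.2.2 = false →
    sA.1 = (pvIdxs orig.length sB.1.2.2).map (fun j => orig.getD j 0) ∧
    pvSeg ↑orig.length sB.1.1 sB.1.2.1 (-1) (pvIdxs orig.length sB.1.2.2) ↑orig.length ∧
    sB.1.1.length = orig.length ∧ sB.1.2.1.length = orig.length ∧ sB.1.2.2.length = orig.length)

def pvLastS (p : Int) (L : List Nat) : Int := (L.getLast?).elim p (fun j => (j : Int))
def pvHeadS (n : Int) (R : List Nat) : Int := (R.head?).elim n (fun j => (j : Int))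

theorem pvLastS_cons (j : Nat) (rest : List Nat) (p : Int) :
    pvLastS p (j :: rest) = pvLastS (↑j) rest := by
  cases rest with
  | nil => simp [pvLastS]
  | cons a l =>
      have h : (a :: l).getLast? = some ((a :: l).getLast (by simp)) :=
        List.getLast?_eq_some_getLast (by simp)
      simp [pvLastS, List.getLast?_cons_cons, h]

theorem pvSeg_append (n : Int) (prv nxt : List Int) (u : Nat) (U : List Nat) (q : Int) :
    ∀ (T : List Nat) (p : Int),
      pvSeg n prv nxt p (T ++ u :: U) q ↔ (pvSeg n prv nxt p T ↑u ∧ pvSeg n prv nxt ↑u U q) := by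
  intro T
  induction T with
  | nil => intro p; simp [pvSeg]
  | cons j rest ih =>
      intro p
      simp only [List.cons_append, pvSeg, ih, and_assoc]

theorem pvSeg_closing (n : Int) (prv nxt : List Int) (q : Int) (hq : q ≠ n) :
    ∀ (L : List Nat) (p : Int), pvSeg n prv nxt p L q → prv.getD q.toNat 0 = pvLastS p L := by
  intro L
  induction L with
  | nil => intro p h; simpa [pvLastS] using h.2 hq
  | cons j rest ih =>
      intro p h
      rw [pvLastS_cons]
      exact ih _ h.2

theorem pvSeg_retarget (n q : Int) (prv nxt prv' nxt' : List Int) :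
    ∀ (L : List Nat) (p r : Int),
    pvSeg n prv nxt p L r →
    (∀ y ∈ L, prv'.getD y 0 = prv.getD y 0) →
    (∀ x ∈ L.dropLast, nxt'.getD x 0 = nxt.getD x 0) →
    (p ≠ -1 → L ≠ [] → nxt'.getD p.toNat 0 = nxt.getD p.toNat 0) →
    (pvLastS p L ≠ -1 → nxt'.getD (pvLastS p L).toNat 0 = q) →
    (q ≠ n → prv'.getD q.toNat 0 = pvLastS p L) →
    pvSeg n prv' nxt' p L q := by
  intro L
  induction L with
  | nil =>
      intro p r _ _ _ _ hj1 hj2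
      exact ⟨fun hp => hj1 (by simpa [pvLastS] using hp), fun hq => by simpa [pvLastS] using hj2 hq⟩
  | cons j rest ih =>
      intro p r h hp hn hnp hj1 hj2
      refine ⟨⟨fun hpne => ?_, fun hjn => ?_⟩, ?_⟩
      · rw [hnp hpne (by simp)]; exact h.1.1 hpne
      · simp only [Int.toNat_natCast]; rw [hp j (by simp)]
        simpa [Int.toNat_natCast] using h.1.2 hjn
      · refine ih (↑j) r h.2 (fun y hy => hp y (by simp [hy])) (fun x hx => ?_) (fun _ hrest => ?_) ?_ ?_
        · refine hn x ?_
          rcases rest with _ | ⟨a, l⟩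
          · simp at hx
          · simpa using Or.inr hx
        · refine hn j ?_
          rcases rest with _ | ⟨a, l⟩
          · simp at hrest
          · simp
        · rw [← pvLastS_cons j rest p]; exact hj1
        · rw [← pvLastS_cons j rest p]; exact hj2

theorem pvIdxs_decomp (n c : Nat) (alive : List Bool) (hc : c < n) (ha : pvAliveP alive c = true) :
    pvIdxs n alive =
      (List.range c).filter (pvAliveP alive) ++
        c :: (List.range' (c+1) (n-c-1)).filter (pvAliveP alive) := by
  unfold pvIdxs
  have h1 : List.range n = List.range c ++ List.range' c (n - c) := by
    rw [List.range_eq_range', List.range_eq_range']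
    conv_lhs => rw [show n = c + (n - c) from by omega]
    rw [← List.range'_append_1]
    norm_num
  have h2 : List.range' c (n - c) = c :: List.range' (c+1) (n-c-1) := by
    obtain ⟨m, hm⟩ : ∃ m, n - c = m + 1 := ⟨n - c - 1, by omega⟩
    rw [hm, List.range'_succ]
    simp
  rw [h1, h2, List.filter_append, List.filter_cons, if_pos ha]

theorem pvAliveP_set_false (alive : List Bool) (k : Nat) (hk : k < alive.length) (j : Nat) :
    pvAliveP (alive.set k false) j = (pvAliveP alive j && !(j == k)) := by
  unfold pvAliveP
  by_cases h : j = k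
  · subst h
    simp [List.getD_eq_getElem?_getD, hk]
  · simp [List.getD_eq_getElem?_getD, List.getElem?_set_ne (by omega : k ≠ j), h]

theorem pvIdxs_set_false (n : Nat) (alive : List Bool) (k : Nat) (hk : k < alive.length) :
    pvIdxs n (alive.set k false) = (pvIdxs n alive).filter (fun j => !(j == k)) := by
  unfold pvIdxs
  rw [List.filter_filter]
  exact List.filter_congr (fun x _ => by rw [pvAliveP_set_false alive k hk x, Bool.and_comm])

theorem pv_pos_build (v : Int) :
    ∀ (xs : List Int) (s : Int) (d : PySem.Dict Int (List Nat)),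
      ((PySem.List.enumerate xs s).foldl
        (fun d jv => d.insert jv.2 (d.getD jv.2 [] ++ [jv.1.toNat])) d).getD v []
      = d.getD v [] ++ (((PySem.List.enumerate xs s).filter (fun jv => jv.2 == v)).map (fun jv => jv.1.toNat)) := by
  intro xs
  induction xs with
  | nil => intro s d; simp [PySem.List.enumerate_nil]
  | cons x t ih =>
      intro s d
      rw [PySem.List.enumerate_cons]
      simp only [List.foldl_cons, List.filter_cons]
      rw [ih]
      by_cases hxv : x = v
      · subst hxv
        simp [PySem.Dict.getD_insert_self, List.append_assoc]
      · have hne : (((s, x) : Int × Int).2 == v) = false := by simpa using hxv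
        rw [hne]
        simp only [Bool.false_eq_true, if_false]
        rw [PySem.Dict.getD_insert_of_ne _ _ _ (fun h => hxv (Eq.symm h))]

theorem pv_enum_positions (v : Int) :
    ∀ (xs : List Int) (s : Nat),
      ((PySem.List.enumerate xs ↑s).filter (fun jv => jv.2 == v)).map (fun jv => jv.1.toNat)
      = ((List.range xs.length).filter (fun j => xs.getD j 0 == v)).map (· + s) := by
  intro xs
  induction xs with
  | nil => intro s; simp [PySem.List.enumerate_nil]
  | cons x t ih =>
      intro s
      rw [PySem.List.enumerate_cons, show ((s : Int) + 1) = ((s + 1 : Nat) : Int) from by push_cast; ring]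
      simp only [List.length_cons, List.range_succ_eq_map, List.filter_cons]
      have htail : ∀ l : List Nat, (l.map Nat.succ).filter (fun j => (x :: t).getD j 0 == v)
          = (l.filter (fun j => t.getD j 0 == v)).map Nat.succ := by
        intro l
        rw [List.filter_map]
        congr 1
      have hmap : ∀ l : List Nat, ((l.filter (fun j => t.getD j 0 == v)).map Nat.succ).map (· + s)
          = (l.filter (fun j => t.getD j 0 == v)).map (· + (s + 1)) := by
        intro l
        rw [List.map_map]
        exact List.map_congr_left (fun a _ => by simp [Nat.succ_eq_add_one]; omega)
      by_cases hxv : (x == v) = true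
      · simp only [hxv, if_pos, List.getD_cons_zero, List.map_cons]
        rw [ih (s + 1), htail, hmap]
        simp
      · have h0 : ((x :: t).getD 0 0 == v) = false := by simpa using hxv
        simp only [hxv, Bool.false_eq_true, if_false, List.getD_cons_zero]
        rw [ih (s + 1), htail, hmap]

theorem pv_pos_spec (items : List Int) (v : Int) :
    ((PySem.List.enumerate items 0).foldl
        (fun d jv => d.insert jv.2 (d.getD jv.2 [] ++ [jv.1.toNat])) PySem.Dict.empty).getD v []
      = (List.range items.length).filter (fun j => items.getD j 0 == v) := by
  rw [pv_pos_build]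
  rw [show (0 : Int) = ((0 : Nat) : Int) from rfl, pv_enum_positions]
  simp [PySem.Dict.empty, PySem.Dict.getD, PySem.Dict.get?]

theorem pv_getD_append_len {l l' : List Int} {x : Int} {k : Nat} :
    (l ++ x :: l').getD (l.length + k) 0 = (x :: l').getD k 0 := by
  induction l with
  | nil => simp
  | cons a t ih =>
      simp only [List.cons_append, List.length_cons]
      rw [show t.length + 1 + k = (t.length + k) + 1 from by omega, List.getD_cons_succ]
      exact ih

theorem pv_erase_at_len {l t : List Int} {x : Int} :
    (l ++ x :: t).eraseIdx l.length = l ++ t := by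
  induction l with
  | nil => simp
  | cons a s ih => simpa using ih

theorem pvSeg_last_nxt (n : Int) (prv nxt : List Int) (q : Int) :
    ∀ (L : List Nat) (p : Int), pvSeg n prv nxt p L q → pvLastS p L ≠ -1 →
      nxt.getD (pvLastS p L).toNat 0 = q := by
  intro L
  induction L with
  | nil => intro p h hne; simpa [pvLastS] using h.1 (by simpa [pvLastS] using hne)
  | cons j rest ih =>
      intro p h hne
      rw [pvLastS_cons] at hne ⊢
      exact ih _ h.2 hne

theorem pv_getD_pyRange (a : Int) (m k : Nat) (hk : k < m) :
    (PySem.List.pyRange a (a + ↑m) 1).getD k 0 = a + ↑k := by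
  have hlen : (PySem.List.pyRange a (a + ↑m) 1).length = m := by
    rw [PySem.List.length_pyRange_one]; simp
  rw [List.getD_eq_getElem _ _ (by omega)]
  exact PySem.List.getElem_pyRange_one _ _ _ _

theorem pv_init_seg (n : Nat) :
    ∀ (m k : Nat), k + m = n →
      pvSeg ↑n (PySem.List.pyRange (-1) (↑n - 1) 1) (PySem.List.pyRange 1 (↑n + 1) 1)
        (↑k - 1) (List.range' k m) ↑n := by
  intro m
  induction m with
  | zero =>
      intro k hk
      refine ⟨fun hne => ?_, fun hq => absurd rfl hq⟩
      have hk1 : 1 ≤ k := by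
        by_contra hcon
        have : k = 0 := by omega
        subst this
        simp at hne
      have ht : ((k : Int) - 1).toNat = k - 1 := by omega
      rw [ht, show ((n : Int) + 1) = 1 + ↑n from by ring, pv_getD_pyRange 1 n (k - 1) (by omega)]
      push_cast [Nat.cast_sub hk1]
      omega
  | succ m ih =>
      intro k hk
      rw [List.range'_succ]
      have hkn : k < n := by omega
      refine ⟨⟨fun hne => ?_, fun _ => ?_⟩, ?_⟩
      · have hk1 : 1 ≤ k := by
          by_contra hcon
          have : k = 0 := by omega
          subst this
          simp at hne
        have ht : ((k : Int) - 1).toNat = k - 1 := by omega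
        rw [ht, show ((n : Int) + 1) = 1 + ↑n from by ring, pv_getD_pyRange 1 n (k - 1) (by omega)]
        push_cast [Nat.cast_sub hk1]
        omega
      · rw [Int.toNat_natCast, show ((n : Int) - 1) = -1 + ↑n from by ring,
          pv_getD_pyRange (-1) n k hkn]
        ring
      · have hcast : ((k + 1 : Nat) : Int) - 1 = ↑k := by push_cast; ring
        have := ih (k + 1) (by omega)
        rwa [hcast] at this

theorem pv_init (orig : List Int) :
    pvInv orig (orig, 0, false)
      ((PySem.List.pyRange (-1) (↑orig.length - 1) 1, PySem.List.pyRange 1 (↑orig.length + 1) 1,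
        List.replicate orig.length true), 0, false) := by
  refine ⟨rfl, rfl, fun _ => ?_⟩
  have hidx : pvIdxs orig.length (List.replicate orig.length true) = List.range orig.length := by
    unfold pvIdxs
    apply List.filter_eq_self.mpr
    intro j hj
    have hjl : j < orig.length := List.mem_range.mp hj
    simp [pvAliveP, List.getD_eq_getElem?_getD, hjl]
  refine ⟨?_, ?_, ?_, ?_, ?_⟩
  · show orig = _
    rw [hidx]
    apply List.ext_getElem (by simp)
    intro k h1 h2
    simp [List.getElem_map, List.getElem_range, List.getD_eq_getElem?_getD,
      List.getElem?_eq_getElem h1]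
  · show pvSeg _ _ _ _ _ _
    rw [hidx]
    have := pv_init_seg orig.length orig.length 0 (by omega)
    simpa [List.range_eq_range'] using this
  · show (PySem.List.pyRange (-1) (↑orig.length - 1) 1).length = orig.length
    rw [PySem.List.length_pyRange_one]
    omega
  · show (PySem.List.pyRange 1 (↑orig.length + 1) 1).length = orig.length
    rw [PySem.List.length_pyRange_one]
    omega
  · simp

theorem pv_getD_set_self {α : Type} (l : List α) (i : Nat) (v d : α) (h : i < l.length) :
    (l.set i v).getD i d = v := by
  simp [List.getD_eq_getElem?_getD, List.getElem?_set_eq_of_lt v h]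

theorem pv_getD_set_ne {α : Type} (l : List α) {i j : Nat} (v d : α) (h : i ≠ j) :
    (l.set i v).getD j d = l.getD j d := by
  simp [List.getD_eq_getElem?_getD, List.getElem?_set_ne h]

theorem pvSeg_cons_iff (n : Int) (prv nxt : List Int) (p q : Int) (j : Nat) (rest : List Nat) :
    pvSeg n prv nxt p (j :: rest) q ↔ pvLk n prv nxt p ↑j ∧ pvSeg n prv nxt ↑j rest q := Iff.rfl

theorem pvSeg_nil_iff (n : Int) (prv nxt : List Int) (p q : Int) :
    pvSeg n prv nxt p [] q ↔ pvLk n prv nxt p q := Iff.rfl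

theorem pvIdxs_remove_two (norig : Nat) (alive : List Bool) (x y : Nat)
    (hx : x < alive.length) (hy : y < alive.length) :
    pvIdxs norig ((alive.set x false).set y false)
      = (pvIdxs norig alive).filter (fun j => !(j == x) && !(j == y)) := by
  rw [pvIdxs_set_false norig (alive.set x false) y (by simpa using hy),
    pvIdxs_set_false norig alive x hx, List.filter_filter]
  exact List.filter_congr (fun a _ => by rw [Bool.and_comm])

theorem pv_dropLast_lt (T : List Nat) (hTpair : T.Pairwise (· < ·)) (x : Nat)
    (hx : x ∈ T.dropLast) (hne : T ≠ []) : x < T.getLast hne := by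
  have hconcat := List.dropLast_concat_getLast hne
  rw [← hconcat] at hTpair
  exact (List.pairwise_append.mp hTpair).2.2 x hx (T.getLast hne) (by simp)

theorem pv_unlink_fwd (norig : Nat) (prv nxt : List Int) (alive : List Bool)
    (T U' : List Nat) (c u : Nat)
    (hlp : prv.length = norig) (hln : nxt.length = norig)
    (hptr : pvSeg ↑norig prv nxt (-1) (T ++ c :: u :: U') ↑norig)
    (hTlt : ∀ j ∈ T, j < c) (hcu : c < u) (hUgt : ∀ j ∈ U', u < j ∧ j < norig)
    (hcn : c < norig) (hun : u < norig)
    (hTpair : T.Pairwise (· < ·)) (hUpair : U'.Pairwise (· < ·)) :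
    pvSeg ↑norig (pvUnlink ↑norig (pvUnlink ↑norig (prv, nxt, alive) c) u).1
      (pvUnlink ↑norig (pvUnlink ↑norig (prv, nxt, alive) c) u).2.1
      (-1) (T ++ U') ↑norig := by
  have hsplit := (pvSeg_append ↑norig prv nxt c (u :: U') ↑norig T (-1)).mp hptr
  have hsegT := hsplit.1
  have hsegCU := hsplit.2
  rw [pvSeg_cons_iff] at hsegCU
  have hlkcu := hsegCU.1
  have hsegU := hsegCU.2
  have haval : prv.getD c 0 = pvLastS (-1) T := by
    have := pvSeg_closing ↑norig prv nxt ↑c (by omega) T (-1) hsegT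
    simpa using this
  have hbval : nxt.getD c 0 = (↑u : Int) := hlkcu.1 (by omega)
  have hwold : nxt.getD u 0 = pvHeadS ↑norig U' := by
    cases U' with
    | nil =>
        rw [pvSeg_nil_iff] at hsegU
        simpa [pvHeadS] using hsegU.1 (by omega)
    | cons w0 U'' =>
        rw [pvSeg_cons_iff] at hsegU
        simpa [pvHeadS] using hsegU.1.1 (by omega)
  have haSlast : ∀ hne : T ≠ [], pvLastS (-1) T = ↑(T.getLast hne) := by
    intro hne
    simp [pvLastS, List.getLast?_eq_some_getLast hne]
  have haSnil : T = [] → pvLastS (-1) T = -1 := by intro h; simp [h, pvLastS]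
  set aS := pvLastS (-1) T with haSdef
  have haSlt : aS ≠ -1 → (aS.toNat < c ∧ aS = ↑aS.toNat) := by
    intro hne
    by_cases hT : T = []
    · exact absurd (haSnil hT) hne
    · have h1 := haSlast hT
      have h2 : T.getLast hT ∈ T := List.getLast_mem hT
      have h3 := hTlt _ h2
      constructor
      · rw [h1]; simpa using h3
      · rw [h1]; simp
  have h1 : pvUnlink ↑norig (prv, nxt, alive) c
      = (prv.set u aS,
         (if aS ≠ -1 then nxt.set aS.toNat ↑u else nxt),
         alive.set c false) := by
    simp only [pvUnlink]
    rw [haval, hbval, if_pos (show (↑u : Int) ≠ ↑norig by omega)]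
    simp
  set w := pvHeadS ↑norig U' with hwdef
  have hnxt1u : (if aS ≠ -1 then nxt.set aS.toNat ↑u else nxt).getD u 0 = w := by
    split
    · rename_i hne
      rw [pv_getD_set_ne _ _ _ (by have := (haSlt hne).1; omega)]
      exact hwold
    · exact hwold
  have hprv1u : (prv.set u aS).getD u 0 = aS := pv_getD_set_self _ _ _ _ (by omega)
  have h2 : pvUnlink ↑norig (pvUnlink ↑norig (prv, nxt, alive) c) u
      = ((if w ≠ ↑norig then (prv.set u aS).set w.toNat aS else prv.set u aS),
         (if aS ≠ -1 then nxt.set aS.toNat w else nxt),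
         (alive.set c false).set u false) := by
    rw [h1]
    simp only [pvUnlink]
    rw [hprv1u, hnxt1u]
    by_cases haSne : aS = -1
    · simp [haSne]
    · simp [haSne, List.set_set]
  rw [h2]
  rcases U' with _ | ⟨w0, U''⟩
  · have hw : w = ↑norig := by simp [hwdef, pvHeadS]
    rw [if_neg (by simp [hw])]
    simp only [List.append_nil]
    apply pvSeg_retarget ↑norig ↑norig prv nxt _ _ T (-1) ↑c hsegT
    · intro y hy
      exact pv_getD_set_ne _ _ _ (by have := hTlt y hy; omega)
    · intro x hx
      by_cases haSne : aS = -1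
      · simp [haSne]
      · have hT : T ≠ [] := by intro h; exact haSne (haSnil h)
        rw [if_pos haSne]
        refine pv_getD_set_ne _ _ _ ?_
        have hxlt := pv_dropLast_lt T hTpair x hx hT
        have := haSlast hT
        have : aS.toNat = T.getLast hT := by rw [this]; simp
        omega
    · intro hp _; exact absurd rfl hp
    · intro hne
      rw [if_pos hne, pv_getD_set_self _ _ _ _ (by have := (haSlt hne).1; omega)]
      exact hw
    · intro hq; exact absurd rfl hq
  · have hw : w = ↑w0 := by simp [hwdef, pvHeadS]
    have hw0 := hUgt w0 (by simp)
    have hU'' : ∀ j ∈ U'', w0 < j ∧ j < norig := by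
      intro j hj
      exact ⟨(List.pairwise_cons.mp hUpair).1 j hj, (hUgt j (by simp [hj])).2⟩
    rw [pvSeg_cons_iff] at hsegU
    apply (pvSeg_append ↑norig _ _ w0 U'' ↑norig T (-1)).mpr
    constructor
    · apply pvSeg_retarget ↑norig ↑w0 prv nxt _ _ T (-1) ↑c hsegT
      · intro y hy
        have hyc := hTlt y hy
        rw [if_pos (by rw [hw]; omega)]
        rw [pv_getD_set_ne _ _ _ (by rw [hw]; simp; omega)]
        exact pv_getD_set_ne _ _ _ (by omega)
      · intro x hx
        by_cases haSne : aS = -1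
        · simp [haSne]
        · have hT : T ≠ [] := by intro h; exact haSne (haSnil h)
          rw [if_pos haSne]
          refine pv_getD_set_ne _ _ _ ?_
          have hxlt := pv_dropLast_lt T hTpair x hx hT
          have h1' := haSlast hT
          have : aS.toNat = T.getLast hT := by rw [h1']; simp
          omega
      · intro hp _; exact absurd rfl hp
      · intro hne
        rw [if_pos hne, pv_getD_set_self _ _ _ _ (by have := (haSlt hne).1; omega)]
        exact hw
      · intro _
        rw [if_pos (by rw [hw]; omega)]
        rw [hw]
        simpa using pv_getD_set_self (prv.set u aS) w0 aS 0 (by simp; omega)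
    · apply pvSeg_retarget ↑norig ↑norig prv nxt _ _ U'' ↑w0 ↑norig hsegU.2
      · intro y hy
        have hyw := hU'' y hy
        rw [if_pos (by rw [hw]; omega)]
        rw [pv_getD_set_ne _ _ _ (by rw [hw]; simp; omega)]
        exact pv_getD_set_ne _ _ _ (by omega)
      · intro x hx
        have hxU : x ∈ U'' := List.dropLast_sublist _ |>.subset hx
        have hxw := hU'' x hxU
        by_cases haSne : aS = -1
        · simp [haSne]
        · rw [if_pos haSne]
          exact pv_getD_set_ne _ _ _ (by have := (haSlt haSne).1; omega)
      · intro _ _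
        by_cases haSne : aS = -1
        · simp [haSne]
        · rw [if_pos haSne]
          refine pv_getD_set_ne _ _ _ ?_
          have := (haSlt haSne).1
          simp
          omega
      · intro hne
        have hlastS : ∃ g : Nat, pvLastS ↑w0 U'' = ↑g ∧ w0 ≤ g := by
          cases U'' with
          | nil => exact ⟨w0, by simp [pvLastS], le_refl _⟩
          | cons a l =>
              refine ⟨(a :: l).getLast (by simp), ?_, ?_⟩
              · simp [pvLastS, List.getLast?_eq_some_getLast (l := a :: l) (by simp)]
              · have := (hU'' _ (List.getLast_mem (l := a :: l) (by simp))).1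
                omega
        obtain ⟨g, hg1, hg2⟩ := hlastS
        have hold := pvSeg_last_nxt ↑norig prv nxt ↑norig U'' ↑w0 hsegU.2 hne
        by_cases haSne : aS = -1
        · simpa [haSne] using hold
        · rw [if_pos haSne]
          rw [pv_getD_set_ne _ _ _ (by have := (haSlt haSne).1; rw [hg1]; simp; omega)]
          exact hold
      · intro hq; exact absurd rfl hq

theorem pv_unlink_bwd (norig : Nat) (prv nxt : List Int) (alive : List Bool)
    (T₀ U : List Nat) (lt c : Nat)
    (hlp : prv.length = norig) (hln : nxt.length = norig)
    (hptr : pvSeg ↑norig prv nxt (-1) (T₀ ++ lt :: c :: U) ↑norig)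
    (hTlt : ∀ j ∈ T₀, j < lt) (hltc : lt < c) (hUgt : ∀ j ∈ U, c < j ∧ j < norig)
    (hltn : lt < norig) (hcn : c < norig)
    (hTpair : T₀.Pairwise (· < ·)) (hUpair : U.Pairwise (· < ·)) :
    pvSeg ↑norig (pvUnlink ↑norig (pvUnlink ↑norig (prv, nxt, alive) c) lt).1
      (pvUnlink ↑norig (pvUnlink ↑norig (prv, nxt, alive) c) lt).2.1
      (-1) (T₀ ++ U) ↑norig := by
  have hsplit := (pvSeg_append ↑norig prv nxt lt (c :: U) ↑norig T₀ (-1)).mp hptr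
  have hsegT := hsplit.1
  have hsegCU := hsplit.2
  rw [pvSeg_cons_iff] at hsegCU
  have hlkltc := hsegCU.1
  have hsegU := hsegCU.2
  have haval : prv.getD c 0 = (↑lt : Int) := by
    have := hlkltc.2 (by omega)
    simpa using this
  have hwold : nxt.getD c 0 = pvHeadS ↑norig U := by
    cases U with
    | nil =>
        rw [pvSeg_nil_iff] at hsegU
        simpa [pvHeadS] using hsegU.1 (by omega)
    | cons w0 U'' =>
        rw [pvSeg_cons_iff] at hsegU
        simpa [pvHeadS] using hsegU.1.1 (by omega)
  have haSlast : ∀ hne : T₀ ≠ [], pvLastS (-1) T₀ = ↑(T₀.getLast hne) := by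
    intro hne
    simp [pvLastS, List.getLast?_eq_some_getLast hne]
  have haSnil : T₀ = [] → pvLastS (-1) T₀ = -1 := by intro h; simp [h, pvLastS]
  set aS := pvLastS (-1) T₀ with haSdef
  have haSlt : aS ≠ -1 → (aS.toNat < lt ∧ aS = ↑aS.toNat) := by
    intro hne
    by_cases hT : T₀ = []
    · exact absurd (haSnil hT) hne
    · have h1 := haSlast hT
      have h3 := hTlt _ (List.getLast_mem hT)
      constructor
      · rw [h1]; simpa using h3
      · rw [h1]; simp
  have haold : prv.getD lt 0 = aS := by
    have := pvSeg_closing ↑norig prv nxt ↑lt (by omega) T₀ (-1) hsegT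
    simpa using this
  set w := pvHeadS ↑norig U with hwdef
  have hwcases : (U = [] ∧ w = ↑norig) ∨ ∃ w0 U'', U = w0 :: U'' ∧ w = ↑w0 := by
    cases U with
    | nil => left; exact ⟨rfl, by simp [hwdef, pvHeadS]⟩
    | cons w0 U'' => right; exact ⟨w0, U'', rfl, by simp [hwdef, pvHeadS]⟩
  have hwgt : w ≠ ↑norig → ∃ w0 : Nat, w = ↑w0 ∧ c < w0 ∧ w0 < norig := by
    intro hne
    rcases hwcases with ⟨_, hw⟩ | ⟨w0, U'', hU, hw⟩
    · exact absurd hw hne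
    · exact ⟨w0, hw, (hUgt w0 (by simp [hU])).1, (hUgt w0 (by simp [hU])).2⟩
  have h1 : pvUnlink ↑norig (prv, nxt, alive) c
      = ((if w ≠ ↑norig then prv.set w.toNat ↑lt else prv),
         nxt.set lt w,
         alive.set c false) := by
    simp only [pvUnlink]
    rw [haval, hwold, if_pos (show (↑lt : Int) ≠ -1 by omega)]
    simp
  have hprv1lt : (if w ≠ ↑norig then prv.set w.toNat ↑lt else prv).getD lt 0 = aS := by
    split
    · rename_i hne
      obtain ⟨w0, hw, hcw, _⟩ := hwgt hne
      rw [pv_getD_set_ne _ _ _ (by rw [hw]; simp; omega)]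
      exact haold
    · exact haold
  have hnxt1lt : (nxt.set lt w).getD lt 0 = w := pv_getD_set_self _ _ _ _ (by omega)
  have h2 : pvUnlink ↑norig (pvUnlink ↑norig (prv, nxt, alive) c) lt
      = ((if w ≠ ↑norig then prv.set w.toNat aS else prv),
         (if aS ≠ -1 then (nxt.set lt w).set aS.toNat w else nxt.set lt w),
         (alive.set c false).set lt false) := by
    rw [h1]
    simp only [pvUnlink]
    rw [hprv1lt, hnxt1lt]
    by_cases hwne : w = ↑norig
    · simp [hwne]
    · simp [hwne, List.set_set]
  rw [h2]
  have hnxt2_at : ∀ x : Nat, x ≠ lt → (aS ≠ -1 → x ≠ aS.toNat) →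
      (if aS ≠ -1 then (nxt.set lt w).set aS.toNat w else nxt.set lt w).getD x 0 = nxt.getD x 0 := by
    intro x hx1 hx2
    by_cases haSne : aS = -1
    · simp only [haSne]
      rw [if_neg (by simp)]
      exact pv_getD_set_ne _ _ _ (Ne.symm hx1)
    · rw [if_pos haSne, pv_getD_set_ne _ _ _ (Ne.symm (hx2 haSne)),
        pv_getD_set_ne _ _ _ (Ne.symm hx1)]
  rcases hwcases with ⟨hUnil, hw⟩ | ⟨w0, U'', hU, hw⟩
  · subst hUnil
    rw [if_neg (by simp [hw])]
    simp only [List.append_nil]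
    apply pvSeg_retarget ↑norig ↑norig prv nxt _ _ T₀ (-1) ↑lt hsegT
    · intro y hy; rfl
    · intro x hx
      have hT : T₀ ≠ [] := by intro hh; rw [hh] at hx; simp at hx
      refine hnxt2_at x (by have := pv_dropLast_lt T₀ hTpair x hx hT; have := hTlt _ (List.getLast_mem hT); omega) ?_
      intro haSne
      have h1' := haSlast hT
      have : aS.toNat = T₀.getLast hT := by rw [h1']; simp
      have := pv_dropLast_lt T₀ hTpair x hx hT
      omega
    · intro hp _; exact absurd rfl hp
    · intro hne
      rw [if_pos hne, pv_getD_set_self _ _ _ _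
        (by have := (haSlt hne).1; simp only [List.length_set]; omega)]
      exact hw
    · intro hq; exact absurd rfl hq
  · subst hU
    have hw0 := hUgt w0 (by simp)
    have hU'' : ∀ j ∈ U'', w0 < j ∧ j < norig := by
      intro j hj
      exact ⟨(List.pairwise_cons.mp hUpair).1 j hj, (hUgt j (by simp [hj])).2⟩
    rw [pvSeg_cons_iff] at hsegU
    apply (pvSeg_append ↑norig _ _ w0 U'' ↑norig T₀ (-1)).mpr
    constructor
    · apply pvSeg_retarget ↑norig ↑w0 prv nxt _ _ T₀ (-1) ↑lt hsegT
      · intro y hy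
        have hyl := hTlt y hy
        rw [if_pos (by rw [hw]; omega)]
        exact pv_getD_set_ne _ _ _ (by rw [hw]; simp; omega)
      · intro x hx
        have hT : T₀ ≠ [] := by intro hh; rw [hh] at hx; simp at hx
        refine hnxt2_at x (by have := pv_dropLast_lt T₀ hTpair x hx hT; have := hTlt _ (List.getLast_mem hT); omega) ?_
        intro haSne
        have h1' := haSlast hT
        have : aS.toNat = T₀.getLast hT := by rw [h1']; simp
        have := pv_dropLast_lt T₀ hTpair x hx hT
        omega
      · intro hp _; exact absurd rfl hp
      · intro hne
        rw [if_pos hne, pv_getD_set_self _ _ _ _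
          (by have := (haSlt hne).1; simp only [List.length_set]; omega)]
        exact hw
      · intro _
        rw [if_pos (by rw [hw]; omega), hw]
        simpa using pv_getD_set_self prv w0 aS 0 (by omega)
    · apply pvSeg_retarget ↑norig ↑norig prv nxt _ _ U'' ↑w0 ↑norig hsegU.2
      · intro y hy
        have hyw := hU'' y hy
        rw [if_pos (by rw [hw]; omega)]
        exact pv_getD_set_ne _ _ _ (by rw [hw]; simp; omega)
      · intro x hx
        have hxU : x ∈ U'' := List.dropLast_sublist _ |>.subset hx
        have hxw := hU'' x hxU
        refine hnxt2_at x (by omega) (fun haSne => by have := (haSlt haSne).1; omega)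
      · intro _ _
        refine hnxt2_at w0 (by omega) (fun haSne => by have := (haSlt haSne).1; omega)
      · intro hne
        have hlastS : ∃ g : Nat, pvLastS ↑w0 U'' = ↑g ∧ w0 ≤ g := by
          cases U'' with
          | nil => exact ⟨w0, by simp [pvLastS], le_refl _⟩
          | cons a l =>
              refine ⟨(a :: l).getLast (by simp), ?_, ?_⟩
              · simp [pvLastS, List.getLast?_eq_some_getLast (l := a :: l) (by simp)]
              · have := (hU'' _ (List.getLast_mem (l := a :: l) (by simp))).1
                omega
        obtain ⟨g, hg1, hg2⟩ := hlastS
        have hold := pvSeg_last_nxt ↑norig prv nxt ↑norig U'' ↑w0 hsegU.2 hne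
        rw [hg1] at hold ⊢
        simp only [Int.toNat_natCast] at hold ⊢
        rw [hnxt2_at g (by omega) (fun haSne => by have := (haSlt haSne).1; omega)]
        exact hold
      · intro hq; exact absurd rfl hq

theorem pv_unlink_len (n : Int) (t : List Int × List Int × List Bool) (x : Nat) :
    (pvUnlink n t x).1.length = t.1.length ∧ (pvUnlink n t x).2.1.length = t.2.1.length ∧
      (pvUnlink n t x).2.2.length = t.2.2.length := by
  obtain ⟨p, q, a⟩ := t
  simp only [pvUnlink]
  refine ⟨?_, ?_, by simp⟩ <;> split <;> simp

theorem pv_unlink_alive (n : Int) (t : List Int × List Int × List Bool) (x : Nat) :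
    (pvUnlink n t x).2.2 = t.2.2.set x false := by
  obtain ⟨p, q, a⟩ := t
  simp only [pvUnlink]

theorem pv_filter_pair (P S : List Nat) (m1 m2 x y : Nat)
    (hP : ∀ j ∈ P, j < m1) (hS : ∀ j ∈ S, m2 < j) (h12 : m1 < m2)
    (hxy : (x = m1 ∧ y = m2) ∨ (x = m2 ∧ y = m1)) :
    (P ++ m1 :: m2 :: S).filter (fun j => !(j == x) && !(j == y)) = P ++ S := by
  have hxm : (x = m1 ∧ y = m2) ∨ (x = m2 ∧ y = m1) := hxy
  have hm1 : (!(m1 == x) && !(m1 == y)) = false := by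
    rcases hxm with ⟨h1, h2⟩ | ⟨h1, h2⟩ <;> subst h1 <;> subst h2 <;> simp
  have hm2 : (!(m2 == x) && !(m2 == y)) = false := by
    rcases hxm with ⟨h1, h2⟩ | ⟨h1, h2⟩ <;> subst h1 <;> subst h2 <;> simp
  rw [List.filter_append, List.filter_cons, List.filter_cons]
  simp only [hm1, hm2, Bool.false_eq_true, if_false]
  congr 1
  · apply List.filter_eq_self.mpr
    intro j hj
    have := hP j hj
    rcases hxm with ⟨h1, h2⟩ | ⟨h1, h2⟩ <;> subst h1 <;> subst h2 <;> simp <;> omega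
  · apply List.filter_eq_self.mpr
    intro j hj
    have := hS j hj
    rcases hxm with ⟨h1, h2⟩ | ⟨h1, h2⟩ <;> subst h1 <;> subst h2 <;> simp <;> omega

theorem pv_step_right (orig : List Int) (pos : PySem.Dict Int (List Nat)) (i : Int)
    (xs : List Int) (stepsA stepsB : Int) (prv nxt : List Int) (alive : List Bool)
    (T U' : List Nat) (c u : Nat)
    (hs : stepsA = stepsB)
    (hfind : (pos.getD i []).find? (fun p => alive.getD p false) = some c)
    (hxs2 : xs = T.map (fun j => orig.getD j 0) ++
      orig.getD c 0 :: orig.getD u 0 :: U'.map (fun j => orig.getD j 0))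
    (hI2 : pvIdxs orig.length alive = T ++ c :: u :: U')
    (hptr2 : pvSeg ↑orig.length prv nxt (-1) (T ++ c :: u :: U') ↑orig.length)
    (hlp : prv.length = orig.length) (hln : nxt.length = orig.length)
    (hla : alive.length = orig.length)
    (hcont : xs.contains i = true)
    (hidx : PySem.List.index? xs i = some T.length)
    (hTlt : ∀ j ∈ T, j < c) (hcu : c < u) (hUgt : ∀ j ∈ U', u < j ∧ j < orig.length)
    (hcn : c < orig.length) (hun : u < orig.length)
    (hTpair : T.Pairwise (· < ·)) (hUpair : U'.Pairwise (· < ·))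
    (hcondA : (↑T.length : Int) - 1 < 0 ∨ ((↑T.length : Int) + 1 < (↑xs.length : Int) ∧
        PySem.List.pyGetD xs (↑T.length + 1) 0 > PySem.List.pyGetD xs (↑T.length - 1) 0))
    (hnb : ¬(prv.getD c 0 = -1 ∧ nxt.getD c 0 = (↑orig.length : Int)))
    (hcb : prv.getD c 0 = -1 ∨ (nxt.getD c 0 ≠ (↑orig.length : Int) ∧
        orig.getD (nxt.getD c 0).toNat 0 > orig.getD (prv.getD c 0).toNat 0))
    (hbto : (nxt.getD c 0).toNat = u) :
    pvInv orig (pvBodyA ↑orig.length (xs, stepsA, false) i)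
      (pvBodyB orig ↑orig.length pos ((prv, nxt, alive), stepsB, false) i) := by
  have hlen : xs.length = T.length + U'.length + 2 := by rw [hxs2]; simp; omega
  have hne1 : (xs.length == 1) = false := beq_eq_false_iff_ne.mpr (by omega)
  have hval : PySem.List.pyGetD xs (↑T.length + 1) 0 = orig.getD u 0 := by
    rw [show ((T.length : Int) + 1) = ((T.length + 1 : Nat) : Int) from by push_cast; ring,
      PySem.List.pyGetD_natCast, hxs2,
      show T.length + 1 = (T.map (fun j => orig.getD j 0)).length + 1 from by simp,
      pv_getD_append_len]
    simp
  have hx1 : ((PySem.List.pop? xs ↑T.length).getD (0, xs)).2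
      = T.map (fun j => orig.getD j 0) ++ orig.getD u 0 :: U'.map (fun j => orig.getD j 0) := by
    rw [PySem.List.pop?_natCast xs T.length (by omega)]
    simp only [Option.getD_some]
    conv_lhs => rw [hxs2]
    rw [show T.length = (T.map (fun j => orig.getD j 0)).length from by simp]
    exact pv_erase_at_len
  have hx2 : ((PySem.List.pop? (T.map (fun j => orig.getD j 0) ++
        orig.getD u 0 :: U'.map (fun j => orig.getD j 0)) ↑T.length).getD
        (0, T.map (fun j => orig.getD j 0) ++ orig.getD u 0 :: U'.map (fun j => orig.getD j 0))).2
      = T.map (fun j => orig.getD j 0) ++ U'.map (fun j => orig.getD j 0) := by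
    rw [PySem.List.pop?_natCast _ T.length (by simp)]
    simp only [Option.getD_some]
    rw [show T.length = (T.map (fun j => orig.getD j 0)).length from by simp]
    exact pv_erase_at_len
  have eA : pvBodyA ↑orig.length (xs, stepsA, false) i
      = (T.map (fun j => orig.getD j 0) ++ U'.map (fun j => orig.getD j 0), stepsA + 1,
         decide (orig.getD u 0 = (↑orig.length : Int))) := by
    simp only [pvBodyA, hcont, hidx, Option.getD_some, hne1, Bool.false_eq_true, if_false, if_true]
    rw [if_pos hcondA, if_neg (show ¬((↑T.length : Int) > ↑T.length + 1) from by omega),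
      hval, hx1, hx2]
  have eB : pvBodyB orig ↑orig.length pos ((prv, nxt, alive), stepsB, false) i
      = (pvUnlink ↑orig.length (pvUnlink ↑orig.length (prv, nxt, alive) c) u, stepsB + 1,
         decide (orig.getD u 0 = (↑orig.length : Int))) := by
    simp only [pvBodyB, hfind, Bool.false_eq_true, if_false]
    rw [if_neg hnb, if_pos hcb, hbto]
    simp only [List.foldl_cons, List.foldl_nil]
  rw [eA, eB]
  have halive2 : (pvUnlink ↑orig.length (pvUnlink ↑orig.length (prv, nxt, alive) c) u).2.2
      = (alive.set c false).set u false := by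
    rw [pv_unlink_alive, pv_unlink_alive]
  have hidx2 : pvIdxs orig.length ((alive.set c false).set u false) = T ++ U' := by
    rw [pvIdxs_remove_two orig.length alive c u (by omega) (by omega), hI2]
    exact pv_filter_pair T U' c u c u hTlt (fun j hj => (hUgt j hj).1) hcu (Or.inl ⟨rfl, rfl⟩)
  refine ⟨?_, rfl, fun _ => ?_⟩
  · show stepsA + 1 = stepsB + 1
    rw [hs]
  refine ⟨?_, ?_, ?_, ?_, ?_⟩
  · show T.map _ ++ U'.map _ = _
    rw [show (pvUnlink ↑orig.length (pvUnlink ↑orig.length (prv, nxt, alive) c) u).2.2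
      = (alive.set c false).set u false from halive2, hidx2, List.map_append]
  · show pvSeg _ _ _ _ _ _
    rw [halive2, hidx2]
    exact pv_unlink_fwd orig.length prv nxt alive T U' c u hlp hln hptr2 hTlt hcu hUgt hcn hun
      hTpair hUpair
  · show (pvUnlink _ (pvUnlink _ _ _) _).1.length = _
    rw [(pv_unlink_len _ _ _).1, (pv_unlink_len _ _ _).1]
    exact hlp
  · show (pvUnlink _ (pvUnlink _ _ _) _).2.1.length = _
    rw [(pv_unlink_len _ _ _).2.1, (pv_unlink_len _ _ _).2.1]
    exact hln
  · show (pvUnlink _ (pvUnlink _ _ _) _).2.2.length = _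
    rw [halive2]
    simp [hla]

theorem pv_step_left (orig : List Int) (pos : PySem.Dict Int (List Nat)) (i : Int)
    (xs : List Int) (stepsA stepsB : Int) (prv nxt : List Int) (alive : List Bool)
    (T₀ U : List Nat) (lt c : Nat)
    (hs : stepsA = stepsB)
    (hfind : (pos.getD i []).find? (fun p => alive.getD p false) = some c)
    (hxs2 : xs = T₀.map (fun j => orig.getD j 0) ++
      orig.getD lt 0 :: orig.getD c 0 :: U.map (fun j => orig.getD j 0))
    (hI2 : pvIdxs orig.length alive = T₀ ++ lt :: c :: U)
    (hptr2 : pvSeg ↑orig.length prv nxt (-1) (T₀ ++ lt :: c :: U) ↑orig.length)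
    (hlp : prv.length = orig.length) (hln : nxt.length = orig.length)
    (hla : alive.length = orig.length)
    (hcont : xs.contains i = true)
    (hidx : PySem.List.index? xs i = some (T₀.length + 1))
    (hTlt : ∀ j ∈ T₀, j < lt) (hltc : lt < c) (hUgt : ∀ j ∈ U, c < j ∧ j < orig.length)
    (hltn : lt < orig.length) (hcn : c < orig.length)
    (hTpair : T₀.Pairwise (· < ·)) (hUpair : U.Pairwise (· < ·))
    (hcA : ¬((↑(T₀.length + 1) : Int) - 1 < 0 ∨ ((↑(T₀.length + 1) : Int) + 1 < (↑xs.length : Int) ∧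
        PySem.List.pyGetD xs (↑(T₀.length + 1) + 1) 0 > PySem.List.pyGetD xs (↑(T₀.length + 1) - 1) 0)))
    (hnb : ¬(prv.getD c 0 = -1 ∧ nxt.getD c 0 = (↑orig.length : Int)))
    (hcbF : ¬(prv.getD c 0 = -1 ∨ (nxt.getD c 0 ≠ (↑orig.length : Int) ∧
        orig.getD (nxt.getD c 0).toNat 0 > orig.getD (prv.getD c 0).toNat 0)))
    (hato : (prv.getD c 0).toNat = lt) :
    pvInv orig (pvBodyA ↑orig.length (xs, stepsA, false) i)
      (pvBodyB orig ↑orig.length pos ((prv, nxt, alive), stepsB, false) i) := by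
  have hlen : xs.length = T₀.length + U.length + 2 := by rw [hxs2]; simp; omega
  have hne1 : (xs.length == 1) = false := beq_eq_false_iff_ne.mpr (by omega)
  have hc1 : (↑(T₀.length + 1) : Int) - 1 = ↑T₀.length := by push_cast; ring
  have hval : PySem.List.pyGetD xs (↑T₀.length) 0 = orig.getD lt 0 := by
    rw [PySem.List.pyGetD_natCast, hxs2,
      show T₀.length = (T₀.map (fun j => orig.getD j 0)).length + 0 from by simp,
      pv_getD_append_len]
    simp
  have hx1 : ((PySem.List.pop? xs ↑T₀.length).getD (0, xs)).2
      = T₀.map (fun j => orig.getD j 0) ++ orig.getD c 0 :: U.map (fun j => orig.getD j 0) := by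
    rw [PySem.List.pop?_natCast xs T₀.length (by omega)]
    simp only [Option.getD_some]
    conv_lhs => rw [hxs2]
    rw [show T₀.length = (T₀.map (fun j => orig.getD j 0)).length from by simp]
    exact pv_erase_at_len
  have hx2 : ((PySem.List.pop? (T₀.map (fun j => orig.getD j 0) ++
        orig.getD c 0 :: U.map (fun j => orig.getD j 0)) ↑T₀.length).getD
        (0, T₀.map (fun j => orig.getD j 0) ++ orig.getD c 0 :: U.map (fun j => orig.getD j 0))).2
      = T₀.map (fun j => orig.getD j 0) ++ U.map (fun j => orig.getD j 0) := by
    rw [PySem.List.pop?_natCast _ T₀.length (by simp)]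
    simp only [Option.getD_some]
    rw [show T₀.length = (T₀.map (fun j => orig.getD j 0)).length from by simp]
    exact pv_erase_at_len
  have eA : pvBodyA ↑orig.length (xs, stepsA, false) i
      = (T₀.map (fun j => orig.getD j 0) ++ U.map (fun j => orig.getD j 0), stepsA + 1,
         decide (orig.getD lt 0 = (↑orig.length : Int))) := by
    simp only [pvBodyA, hcont, hidx, Option.getD_some, hne1, Bool.false_eq_true, if_false, if_true]
    rw [if_neg hcA, hc1,
      if_pos (show ((↑(T₀.length + 1) : Int) > ↑T₀.length) from by push_cast; omega),
      hval, hx1, hx2]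
  have eB : pvBodyB orig ↑orig.length pos ((prv, nxt, alive), stepsB, false) i
      = (pvUnlink ↑orig.length (pvUnlink ↑orig.length (prv, nxt, alive) c) lt, stepsB + 1,
         decide (orig.getD lt 0 = (↑orig.length : Int))) := by
    simp only [pvBodyB, hfind, Bool.false_eq_true, if_false]
    rw [if_neg hnb, if_neg hcbF, hato]
    simp only [List.foldl_cons, List.foldl_nil]
  rw [eA, eB]
  have halive2 : (pvUnlink ↑orig.length (pvUnlink ↑orig.length (prv, nxt, alive) c) lt).2.2
      = (alive.set c false).set lt false := by
    rw [pv_unlink_alive, pv_unlink_alive]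
  have hidx2 : pvIdxs orig.length ((alive.set c false).set lt false) = T₀ ++ U := by
    rw [pvIdxs_remove_two orig.length alive c lt (by omega) (by omega), hI2]
    exact pv_filter_pair T₀ U lt c c lt hTlt (fun j hj => (hUgt j hj).1) hltc (Or.inr ⟨rfl, rfl⟩)
  refine ⟨?_, rfl, fun _ => ?_⟩
  · show stepsA + 1 = stepsB + 1
    rw [hs]
  refine ⟨?_, ?_, ?_, ?_, ?_⟩
  · show T₀.map _ ++ U.map _ = _
    rw [show (pvUnlink ↑orig.length (pvUnlink ↑orig.length (prv, nxt, alive) c) lt).2.2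
      = (alive.set c false).set lt false from halive2, hidx2, List.map_append]
  · show pvSeg _ _ _ _ _ _
    rw [halive2, hidx2]
    exact pv_unlink_bwd orig.length prv nxt alive T₀ U lt c hlp hln hptr2 hTlt hltc hUgt hltn hcn
      hTpair hUpair
  · show (pvUnlink _ (pvUnlink _ _ _) _).1.length = _
    rw [(pv_unlink_len _ _ _).1, (pv_unlink_len _ _ _).1]
    exact hlp
  · show (pvUnlink _ (pvUnlink _ _ _) _).2.1.length = _
    rw [(pv_unlink_len _ _ _).2.1, (pv_unlink_len _ _ _).2.1]
    exact hln
  · show (pvUnlink _ (pvUnlink _ _ _) _).2.2.length = _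
    rw [halive2]
    simp [hla]

theorem pv_step (orig : List Int) (pos : PySem.Dict Int (List Nat))
    (hpos : ∀ v, pos.getD v [] = (List.range orig.length).filter (fun j => orig.getD j 0 == v))
    (i : Int) (sA : List Int × Int × Bool) (sB : (List Int × List Int × List Bool) × Int × Bool)
    (h : pvInv orig sA sB) :
    pvInv orig (pvBodyA ↑orig.length sA i) (pvBodyB orig ↑orig.length pos sB i) := by
  obtain ⟨xs, stepsA, dA⟩ := sA
  obtain ⟨⟨prv, nxt, alive⟩, stepsB, dB⟩ := sB
  obtain ⟨hs, hd, hcorr⟩ := h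
  cases dB with
  | true =>
      have hdA : dA = true := hd
      subst hdA
      replace hs : stepsA = stepsB := hs
      have eA : pvBodyA ↑orig.length (xs, stepsA, true) i = (xs, stepsA, true) := by
        simp [pvBodyA]
      have eB : pvBodyB orig ↑orig.length pos ((prv, nxt, alive), stepsB, true) i
          = ((prv, nxt, alive), stepsB, true) := by
        simp [pvBodyB]
      rw [eA, eB]
      exact ⟨hs, rfl, fun hh => by simp at hh⟩
  | false =>
      have hdA : dA = false := hd
      subst hdA
      obtain ⟨hxs, hptr, hlp, hln, hla⟩ := hcorr rfl
      replace hs : stepsA = stepsB := hs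
      replace hxs : xs = (pvIdxs orig.length alive).map (fun j => orig.getD j 0) := hxs
      replace hptr : pvSeg ↑orig.length prv nxt (-1) (pvIdxs orig.length alive)
        ↑orig.length := hptr
      replace hlp : prv.length = orig.length := hlp
      replace hln : nxt.length = orig.length := hln
      replace hla : alive.length = orig.length := hla
      rcases hfind : (pos.getD i []).find? (fun p => alive.getD p false) with _ | c
      · -- value i is nowhere alive: both sides skip
        have hni : i ∉ xs := by
          intro hmemi
          rw [hxs] at hmemi
          obtain ⟨j, hjI, hji⟩ := List.mem_map.mp hmemi
          have hj1 := (List.mem_filter.mp hjI).1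
          have hj2 := (List.mem_filter.mp hjI).2
          have hjpos : j ∈ pos.getD i [] := by
            rw [hpos i]
            exact List.mem_filter.mpr ⟨hj1, by simpa using hji⟩
          exact absurd hj2 (by simpa [pvAliveP] using List.find?_eq_none.mp hfind j hjpos)
        have hcont : xs.contains i = false :=
          Bool.eq_false_iff.mpr (fun hc => hni (List.contains_iff_mem.mp hc))
        have eA : pvBodyA ↑orig.length (xs, stepsA, false) i = (xs, stepsA, false) := by
          simp only [pvBodyA]
          rw [if_neg (show ¬(false = true) by simp), hcont,
            if_neg (show ¬(false = true) by simp)]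
        have eB : pvBodyB orig ↑orig.length pos ((prv, nxt, alive), stepsB, false) i
            = ((prv, nxt, alive), stepsB, false) := by
          simp only [pvBodyB]
          rw [if_neg (show ¬(false = true) by simp), hfind]
        rw [eA, eB]
        exact ⟨hs, rfl, fun _ => ⟨hxs, hptr, hlp, hln, hla⟩⟩
      · -- value i found at first alive position c
        have hfind' := List.find?_eq_some_iff_append.mp hfind
        have halc : alive.getD c false = true := hfind'.1
        obtain ⟨l1, l2, hsplit12, hl1⟩ := hfind'.2
        have hcmem : c ∈ pos.getD i [] := by rw [hsplit12]; simp
        have hcmem' := hcmem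
        rw [hpos i] at hcmem'
        have hcn : c < orig.length := List.mem_range.mp (List.mem_filter.mp hcmem').1
        have hfc : orig.getD c 0 = i := by simpa using (List.mem_filter.mp hcmem').2
        have hposlist_pair : (pos.getD i []).Pairwise (· < ·) := by
          rw [hpos i]
          exact List.Pairwise.filter _ List.pairwise_lt_range
        have hmin : ∀ j, j < c → orig.getD j 0 = i → pvAliveP alive j = false := by
          intro j hjc hji
          have hjpos : j ∈ pos.getD i [] := by
            rw [hpos i]
            exact List.mem_filter.mpr ⟨List.mem_range.mpr (by omega), by simpa using hji⟩
          have hjl1 : j ∈ l1 := by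
            rw [hsplit12] at hjpos
            rcases List.mem_append.mp hjpos with hmem | hmem
            · exact hmem
            · rcases List.mem_cons.mp hmem with h' | h'
              · omega
              · exfalso
                rw [hsplit12] at hposlist_pair
                have hpp := (List.pairwise_append.mp hposlist_pair).2.1
                have hcj := (List.pairwise_cons.mp hpp).1 j h'
                omega
          simpa [pvAliveP] using hl1 j hjl1
        obtain ⟨T, hTdef⟩ : ∃ T, (List.range c).filter (pvAliveP alive) = T := ⟨_, rfl⟩
        obtain ⟨U, hUdef⟩ : ∃ U,
            (List.range' (c+1) (orig.length - c - 1)).filter (pvAliveP alive) = U := ⟨_, rfl⟩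
        have hI : pvIdxs orig.length alive = T ++ c :: U := by
          rw [pvIdxs_decomp orig.length c alive hcn (by simpa [pvAliveP] using halc), hTdef, hUdef]
        have hTmem : ∀ j ∈ T, j < c ∧ pvAliveP alive j = true := by
          intro j hj
          rw [← hTdef] at hj
          have := List.mem_filter.mp hj
          exact ⟨List.mem_range.mp this.1, this.2⟩
        have hUmem : ∀ j ∈ U, c < j ∧ j < orig.length ∧ pvAliveP alive j = true := by
          intro j hj
          rw [← hUdef] at hj
          have := List.mem_filter.mp hj
          have hr := List.mem_range'_1.mp this.1
          exact ⟨by omega, by omega, this.2⟩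
        have hTpair : T.Pairwise (· < ·) := by
          rw [← hTdef]
          exact List.Pairwise.filter _ List.pairwise_lt_range
        have hUpair : U.Pairwise (· < ·) := by
          rw [← hUdef]
          refine List.Pairwise.filter _ ?_
          rw [List.range'_eq_map_range]
          exact List.pairwise_map.mpr (List.pairwise_lt_range.imp (fun hab => by omega))
        have hTne : ∀ j ∈ T, orig.getD j 0 ≠ i := by
          intro j hj he
          have h1 := hTmem j hj
          have h2 := hmin j h1.1 he
          rw [h2] at h1
          exact absurd h1.2 (by simp)
        have hxs' : xs = T.map (fun j => orig.getD j 0) ++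
            orig.getD c 0 :: U.map (fun j => orig.getD j 0) := by
          rw [hxs, hI]
          simp
        have hcont : xs.contains i = true := by
          rw [List.contains_iff_mem, hxs', hfc]
          simp
        have hidx : PySem.List.index? xs i = some T.length := by
          apply (PySem.List.index?_eq_some_iff xs i T.length).mpr
          refine ⟨T.map (fun j => orig.getD j 0), U.map (fun j => orig.getD j 0), ?_, by simp, ?_⟩
          · rw [hxs', hfc]
          · intro hmem
            obtain ⟨j, hj, hji⟩ := List.mem_map.mp hmem
            exact hTne j hj hji
        have hlen : xs.length = T.length + U.length + 1 := by
          rw [hxs']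
          simp
          omega
        rw [hI] at hptr
        have hsegsplit := (pvSeg_append ↑orig.length prv nxt c U ↑orig.length T (-1)).mp hptr
        have haval : prv.getD c 0 = pvLastS (-1) T := by
          have := pvSeg_closing ↑orig.length prv nxt ↑c (by omega) T (-1) hsegsplit.1
          simpa using this
        have hbval : nxt.getD c 0 = pvHeadS ↑orig.length U := by
          cases U with
          | nil =>
              have h0 := hsegsplit.2
              rw [pvSeg_nil_iff] at h0
              simpa [pvHeadS] using h0.1 (by omega)
          | cons w0 U'' =>
              have h0 := hsegsplit.2
              rw [pvSeg_cons_iff] at h0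
              simpa [pvHeadS] using h0.1.1 (by omega)
        by_cases hTnil : T = []
        · have ha : prv.getD c 0 = -1 := by rw [haval, hTnil]; simp [pvLastS]
          by_cases hUnil : U = []
          · have hlen1 : (xs.length == 1) = true := by
              rw [hlen, hTnil, hUnil]
              simp
            have hb : nxt.getD c 0 = ↑orig.length := by rw [hbval, hUnil]; simp [pvHeadS]
            have eA : pvBodyA ↑orig.length (xs, stepsA, false) i
                = (((PySem.List.pop? xs 0).getD (0, xs)).2, stepsA + 1, true) := by
              simp only [pvBodyA, hcont, hlen1, Bool.false_eq_true, if_false, if_true]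
            have eB : pvBodyB orig ↑orig.length pos ((prv, nxt, alive), stepsB, false) i
                = ((prv, nxt, alive), stepsB + 1, true) := by
              simp only [pvBodyB, hfind, Bool.false_eq_true, if_false]
              rw [if_pos ⟨ha, hb⟩]
            rw [eA, eB]
            exact ⟨by show stepsA + 1 = stepsB + 1; rw [hs], rfl, fun hh => by simp at hh⟩
          · obtain ⟨u, U', hUeq⟩ := List.exists_cons_of_ne_nil hUnil
            have hb : nxt.getD c 0 = ↑u := by rw [hbval, hUeq]; simp [pvHeadS]
            have humem := hUmem u (by rw [hUeq]; simp)
            refine pv_step_right orig pos i xs stepsA stepsB prv nxt alive T U' c u hs hfind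
              ?_ ?_ ?_ hlp hln hla hcont hidx (fun j hj => (hTmem j hj).1) humem.1 ?_ hcn
              humem.2.1 hTpair ?_ ?_ ?_ ?_ ?_
            · rw [hxs', hUeq]
              simp
            · rw [hI, hUeq]
            · rw [hUeq] at hptr
              exact hptr
            · intro j hj
              have hmem := hUmem j (by rw [hUeq]; simp [hj])
              have hp := hUpair
              rw [hUeq] at hp
              exact ⟨(List.pairwise_cons.mp hp).1 j hj, hmem.2.1⟩
            · have hp := hUpair
              rw [hUeq] at hp
              exact (List.pairwise_cons.mp hp).2
            · left
              rw [hTnil]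
              simp
            · intro hhh
              rw [hb] at hhh
              have h2 := hhh.2
              have := humem.2.1
              omega
            · left
              exact ha
            · rw [hb]
              simp
        · obtain ⟨T₀, lt, hTeq'⟩ := (List.eq_nil_or_concat T).resolve_left hTnil
          have hTeq : T = T₀ ++ [lt] := by rw [hTeq']; simp [List.concat_eq_append]
          have ha : prv.getD c 0 = ↑lt := by
            rw [haval, hTeq]
            simp [pvLastS]
          have hltmem := hTmem lt (by rw [hTeq]; simp)
          have hT₀lt : ∀ j ∈ T₀, j < lt := by
            intro j hj
            have hp := hTpair
            rw [hTeq] at hp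
            exact (List.pairwise_append.mp hp).2.2 j hj lt (by simp)
          have hT₀pair : T₀.Pairwise (· < ·) := by
            have hp := hTpair
            rw [hTeq] at hp
            exact (List.pairwise_append.mp hp).1
          have hTlen : T.length = T₀.length + 1 := by rw [hTeq]; simp
          have hidx' : PySem.List.index? xs i = some (T₀.length + 1) := by rw [hidx, hTlen]
          have hxs3 : xs = T₀.map (fun j => orig.getD j 0) ++
              orig.getD lt 0 :: orig.getD c 0 :: U.map (fun j => orig.getD j 0) := by
            rw [hxs', hTeq]
            simp
          have hvL : PySem.List.pyGetD xs ((↑T.length : Int) - 1) 0 = orig.getD lt 0 := by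
            rw [hTlen, show ((T₀.length + 1 : Nat) : Int) - 1 = ↑T₀.length from by push_cast; ring,
              PySem.List.pyGetD_natCast, hxs3,
              show T₀.length = (T₀.map (fun j => orig.getD j 0)).length + 0 from by simp,
              pv_getD_append_len]
            simp
          by_cases hUnil : U = []
          · refine pv_step_left orig pos i xs stepsA stepsB prv nxt alive T₀ U lt c hs hfind hxs3
              ?_ ?_ hlp hln hla hcont hidx' hT₀lt hltmem.1
              (fun j hj => ⟨(hUmem j hj).1, (hUmem j hj).2.1⟩)
              (by have := hltmem.1; omega) hcn hT₀pair hUpair ?_ ?_ ?_ ?_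
            · rw [hI, hTeq]
              simp
            · rw [hTeq] at hptr
              have heq : (T₀ ++ [lt]) ++ c :: U = T₀ ++ lt :: c :: U := by simp
              rw [heq] at hptr
              exact hptr
            · intro hcond
              rcases hcond with h1 | ⟨h2, h3⟩
              · omega
              · have hU0 : U.length = 0 := by rw [hUnil]; rfl
                omega
            · intro hhh
              rw [ha] at hhh
              have := hhh.1
              omega
            · intro hcond
              rcases hcond with h1 | ⟨h2, h3⟩
              · rw [ha] at h1
                omega
              · rw [hbval, hUnil] at h2
                simp [pvHeadS] at h2
            · rw [ha]
              simp
          · obtain ⟨u, U', hUeq⟩ := List.exists_cons_of_ne_nil hUnil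
            have hb : nxt.getD c 0 = ↑u := by rw [hbval, hUeq]; simp [pvHeadS]
            have humem := hUmem u (by rw [hUeq]; simp)
            have hvR : PySem.List.pyGetD xs ((↑T.length : Int) + 1) 0 = orig.getD u 0 := by
              rw [show ((T.length : Int) + 1) = ((T.length + 1 : Nat) : Int) from by push_cast; ring,
                PySem.List.pyGetD_natCast, hxs', hUeq,
                show T.length + 1 = (T.map (fun j => orig.getD j 0)).length + 1 from by simp,
                pv_getD_append_len]
              simp
            by_cases hgt : orig.getD u 0 > orig.getD lt 0
            · refine pv_step_right orig pos i xs stepsA stepsB prv nxt alive T U' c u hs hfind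
                ?_ ?_ ?_ hlp hln hla hcont hidx (fun j hj => (hTmem j hj).1) humem.1 ?_ hcn
                humem.2.1 hTpair ?_ ?_ ?_ ?_ ?_
              · rw [hxs', hUeq]
                simp
              · rw [hI, hUeq]
              · rw [hUeq] at hptr
                exact hptr
              · intro j hj
                have hmem := hUmem j (by rw [hUeq]; simp [hj])
                have hp := hUpair
                rw [hUeq] at hp
                exact ⟨(List.pairwise_cons.mp hp).1 j hj, hmem.2.1⟩
              · have hp := hUpair
                rw [hUeq] at hp
                exact (List.pairwise_cons.mp hp).2
              · right
                constructor
                · have hULen : U.length = U'.length + 1 := by rw [hUeq]; simp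
                  omega
                · rw [hvR, hvL]
                  exact hgt
              · intro hhh
                rw [ha] at hhh
                have := hhh.1
                omega
              · right
                constructor
                · rw [hb]
                  have := humem.2.1
                  omega
                · rw [ha, hb]
                  simpa using hgt
              · rw [hb]
                simp
            · refine pv_step_left orig pos i xs stepsA stepsB prv nxt alive T₀ U lt c hs hfind hxs3
                ?_ ?_ hlp hln hla hcont hidx' hT₀lt hltmem.1
                (fun j hj => ⟨(hUmem j hj).1, (hUmem j hj).2.1⟩)
                (by have := hltmem.1; omega) hcn hT₀pair hUpair ?_ ?_ ?_ ?_
              · rw [hI, hTeq]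
                simp
              · rw [hTeq] at hptr
                have heq : (T₀ ++ [lt]) ++ c :: U = T₀ ++ lt :: c :: U := by simp
                rw [heq] at hptr
                exact hptr
              · intro hcond
                rcases hcond with h1 | ⟨h2, h3⟩
                · omega
                · have hcast1 : ((T₀.length + 1 : Nat) : Int) + 1 = (↑T.length : Int) + 1 := by
                    rw [hTlen]
                  have hcast2 : ((T₀.length + 1 : Nat) : Int) - 1 = (↑T.length : Int) - 1 := by
                    rw [hTlen]
                  rw [hcast1, hcast2, hvR, hvL] at h3
                  exact hgt h3
              · intro hhh
                rw [ha] at hhh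
                have := hhh.1
                omega
              · intro hcond
                rcases hcond with h1 | ⟨h2, h3⟩
                · rw [ha] at h1
                  omega
                · rw [ha, hb] at h3
                  simp only [Int.toNat_natCast] at h3
                  exact hgt h3
              · rw [ha]
                simp

theorem pv_fold (orig : List Int) (pos : PySem.Dict Int (List Nat))
    (hpos : ∀ v, pos.getD v [] = (List.range orig.length).filter (fun j => orig.getD j 0 == v))
    (l : List Int) :
    ∀ sA sB, pvInv orig sA sB →
      pvInv orig (l.foldl (pvBodyA ↑orig.length) sA) (l.foldl (pvBodyB orig ↑orig.length pos) sB) := by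
  induction l with
  | nil => intro sA sB h; exact h
  | cons x t ih => intro sA sB h; exact ih _ _ (pv_step orig pos hpos x sA sB h)

-- ===== VERDICT (by name: the statement is the Claim_ definition above) =====
theorem eliminate_neighbours_spec : Claim_equal_eliminate_neighbours := by
  intro items _
  unfold Spec_eliminate_neighbours
  by_cases h1 : items.length = 1
  · simp [eliminate_neighbours, eliminate_neighbours_alt, h1]
  · have hinit := pv_init items
    have hfold := pv_fold items _ (fun v => pv_pos_spec items v)
      (PySem.List.pyRange 1 (↑items.length + 1) 1) _ _ hinit
    simp only [eliminate_neighbours, eliminate_neighbours_alt]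
    rw [if_neg (by simpa using h1), if_neg (by simpa using h1)]
    exact hfold.1
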